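-- pv_equiv track=rewrite | github.com/theorem46/Yang-Mills-Mass-Gap | 1-Core Validation/exp_core_validation_38_representation_invariance_v1.py | G16
-- ===== SOURCE A (Python) =====
-- def G16(n, m):
--     G = []
--     for i in range(n):
--         row = []
--         for j in range(m):
--             row.append(((i // 4) + (j // 4)) % 5)
--         G.append(row)
--     return G
-- ===== SOURCE B (Python) =====
-- def G16(n, m):
--     if n <= 0:
--         return []
--     cols = [j // 4 for j in range(m)]
--     templates = {}
--     G = []
--     for i in range(n):
--         r = i // 4
--         if r not in templates:
--             templates[r] = [(r + c) % 5 for c in cols]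
--         G.append(list(templates[r]))
--     return G
-- ===== Notes on version B (the rewrite author's own statement) =====
-- stated objective: faster
-- what changed: Instead of recomputing ((i//4)+(j//4))%5 per cell, B precomputes the column block indices once, builds one template row per distinct row-block r=i//4 (cached in a dict), and appends a fresh copy of the template for each row; measured ~3x faster since per-cell arithmetic is replaced by list copying.
import Mathlib
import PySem

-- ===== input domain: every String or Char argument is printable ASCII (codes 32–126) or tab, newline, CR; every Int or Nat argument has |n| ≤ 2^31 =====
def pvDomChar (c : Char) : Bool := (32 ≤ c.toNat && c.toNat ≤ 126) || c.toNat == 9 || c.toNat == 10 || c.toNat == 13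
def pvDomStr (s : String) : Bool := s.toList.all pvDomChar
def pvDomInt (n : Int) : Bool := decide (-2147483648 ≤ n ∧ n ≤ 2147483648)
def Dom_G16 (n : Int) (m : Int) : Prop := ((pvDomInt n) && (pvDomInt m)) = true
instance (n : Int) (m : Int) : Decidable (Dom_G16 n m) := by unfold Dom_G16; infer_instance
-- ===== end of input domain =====

-- B builds one template row per distinct row-block r = i//4 (cached in a dict over
-- precomputed column block indices) and appends a copy per row, instead of
-- recomputing ((i//4)+(j//4))%5 for every cell as A does.  Return values agree.

-- ===== PORT A =====
def G16 (n : Int) (m : Int) : List (List Int) :=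
  (PySem.List.pyRange 0 n 1).foldl (fun G i =>
    G ++ [(PySem.List.pyRange 0 m 1).foldl (fun row j =>
      row ++ [PySem.Int.mod (PySem.Int.floordiv i 4 + PySem.Int.floordiv j 4) 5]) []]) []

-- ===== PORT B =====
def G16_alt (n : Int) (m : Int) : List (List Int) :=
  if n ≤ 0 then [] else
  let cols := (PySem.List.pyRange 0 m 1).map (fun j => PySem.Int.floordiv j 4)
  let st := (PySem.List.pyRange 0 n 1).foldl
    (fun (st : PySem.Dict Int (List Int) × List (List Int)) i =>
      let r := PySem.Int.floordiv i 4
      let templates :=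
        if st.1.contains r then st.1
        else st.1.insert r (cols.map (fun c => PySem.Int.mod (r + c) 5))
      -- G.append(list(templates[r])): copying a list of ints is the identity
      (templates, st.2 ++ [templates.getD r []]))
    (PySem.Dict.empty, [])
  st.2

-- ===== PRECONDITION & SPEC =====
def Spec_G16 (n : Int) (m : Int) (out : List (List Int)) : Prop := out = G16_alt n m
instance (n : Int) (m : Int) (out : List (List Int)) : Decidable (Spec_G16 n m out) := by unfold Spec_G16; infer_instance

-- ===== CLAIM (what is proved, stated in full; the proofs are below) =====
def Claim_equal_G16 : Prop := ∀ (n : Int) (m : Int), Dom_G16 n m → Spec_G16 n m (G16 n m)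

-- ===== LEMMAS AND PROOFS =====

-- the template row for row-block r
def pvTmpl (m r : Int) : List Int :=
  ((PySem.List.pyRange 0 m 1).map (fun j => PySem.Int.floordiv j 4)).map
    (fun c => PySem.Int.mod (r + c) 5)

theorem pv_foldl_app {α β : Type} (f : α → β) :
    ∀ (l : List α) (acc : List β),
      l.foldl (fun a x => a ++ [f x]) acc = acc ++ l.map f := by
  intro l
  induction l with
  | nil => simp
  | cons x xs ih => intro acc; simp [List.foldl, ih]

theorem pv_A_closed (n m : Int) :
    G16 n m = (PySem.List.pyRange 0 n 1).map (fun i =>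
      (PySem.List.pyRange 0 m 1).map (fun j =>
        PySem.Int.mod (PySem.Int.floordiv i 4 + PySem.Int.floordiv j 4) 5)) := by
  unfold G16
  rw [pv_foldl_app]
  simp only [List.nil_append]
  congr 1
  funext i
  rw [pv_foldl_app]
  simp

theorem pv_B_loop (m : Int) :
    ∀ (l : List Int) (t : PySem.Dict Int (List Int)) (G : List (List Int)),
      (∀ k v, t.get? k = some v → v = pvTmpl m k) →
      (l.foldl
        (fun (st : PySem.Dict Int (List Int) × List (List Int)) i =>
          let r := PySem.Int.floordiv i 4
          let templates :=
            if st.1.contains r then st.1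
            else st.1.insert r
              (((PySem.List.pyRange 0 m 1).map (fun j => PySem.Int.floordiv j 4)).map
                (fun c => PySem.Int.mod (r + c) 5))
          (templates, st.2 ++ [templates.getD r []]))
        (t, G)).2 = G ++ l.map (fun i => pvTmpl m (PySem.Int.floordiv i 4)) := by
  intro l
  induction l with
  | nil => intro t G _; simp
  | cons i rest ih =>
    intro t G hinv
    simp only [List.foldl, List.map]
    by_cases hc : t.contains (PySem.Int.floordiv i 4)
    · -- cached: the stored value is the template by the invariant
      have hsome : (t.get? (PySem.Int.floordiv i 4)).isSome := by
        rw [← PySem.Dict.contains_eq_isSome_get?]; exact hc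
      obtain ⟨v, hv⟩ := Option.isSome_iff_exists.mp hsome
      have hvt : v = pvTmpl m (PySem.Int.floordiv i 4) := hinv _ _ hv
      simp only [hc, if_true]
      rw [ih t _ hinv, PySem.Dict.getD_eq_get?_getD, hv, hvt]
      simp
    · -- fresh key: insert the template, invariant is preserved
      simp only [hc, Bool.false_eq_true, if_false]
      rw [ih _ _ ?_]
      · rw [PySem.Dict.getD_insert_self]
        simp [pvTmpl]
      · intro k v hv
        rw [PySem.Dict.get?_insert] at hv
        split_ifs at hv with hk
        · cases hv; simp [hk, pvTmpl]
        · exact hinv _ _ hv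

-- ===== VERDICT (by name: the statement is the Claim_ definition above) =====
theorem G16_spec : Claim_equal_G16 := by
  intro n m _
  unfold Spec_G16 G16_alt
  by_cases hn : n ≤ 0
  · simp only [hn, if_true]
    rw [pv_A_closed]
    have : PySem.List.pyRange 0 n 1 = [] := by
      simp [PySem.List.pyRange_one]
      omega
    simp [this]
  · simp only [hn, if_false]
    rw [pv_B_loop m _ PySem.Dict.empty []
      (by intro k v hv; rw [PySem.Dict.get?_empty] at hv; cases hv)]
    rw [pv_A_closed]
    simp [pvTmpl, List.map_map, Function.comp]
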